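-- pv_equiv track=rewrite | github.com/GustavoBazinga/pyQuser | functions/supervisorMessage.py | __mountDictSupCR
-- ===== SOURCE A (Python) =====
-- def __mountDictSupCR(CRErrados, dictSup):
--     superList = {}
--     for value in CRErrados:
--         for keySup, valueSup in dictSup.items():
--             if value in valueSup:
--                 if keySup in superList:
--                     superList[keySup].append(value)
--                 else:
--                     superList[keySup] = [value]
--     return superList
-- ===== SOURCE B (Python) =====
-- def __mountDictSupCR(CRErrados, dictSup):
--     # Pre-invert dictSup into value -> [keySup] (dict order), then one pass over CRErrados.
--     index = {}
--     for keySup, valueSup in dictSup.items():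
--         for v in dict.fromkeys(valueSup):  # distinct values, first-occurrence order
--             index.setdefault(v, []).append(keySup)
--     superList = {}
--     for value in CRErrados:
--         for keySup in index.get(value, []):
--             superList.setdefault(keySup, []).append(value)
--     return superList
-- ===== Notes on version B (the rewrite author's own statement) =====
-- stated objective: faster
-- what changed: Instead of scanning every dictSup entry for every wrong CR (membership test in each value list), B inverts dictSup once into a value->supervisors index and then does a single pass over CRErrados with O(1) lookups.
import Mathlib
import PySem

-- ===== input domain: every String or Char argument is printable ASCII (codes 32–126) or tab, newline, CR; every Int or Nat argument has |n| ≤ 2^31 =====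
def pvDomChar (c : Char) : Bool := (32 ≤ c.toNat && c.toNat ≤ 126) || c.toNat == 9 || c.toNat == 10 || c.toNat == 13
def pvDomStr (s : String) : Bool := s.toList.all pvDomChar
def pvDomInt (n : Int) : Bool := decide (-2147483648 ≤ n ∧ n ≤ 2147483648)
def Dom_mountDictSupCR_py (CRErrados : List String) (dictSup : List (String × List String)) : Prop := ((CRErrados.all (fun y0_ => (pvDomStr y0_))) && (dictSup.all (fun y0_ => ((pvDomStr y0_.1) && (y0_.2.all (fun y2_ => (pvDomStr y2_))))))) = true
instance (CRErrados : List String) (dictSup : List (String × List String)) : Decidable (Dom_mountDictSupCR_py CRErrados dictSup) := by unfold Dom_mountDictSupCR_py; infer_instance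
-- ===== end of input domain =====

-- B inverts dictSup once into a value→supervisors index and then makes one pass over
-- CRErrados, instead of scanning all of dictSup for every wrong CR (objective: faster).


-- ===== PORT A =====
def mountDictSupCR_py (CRErrados : List String) (dictSup : List (String × List String)) : List (String × List String) :=
  (CRErrados.foldl (fun superList value =>
      dictSup.foldl (fun sl kv =>
        if kv.2.contains value then                       -- if value in valueSup
          if sl.contains kv.1 then                        -- if keySup in superList
            sl.modify kv.1 [] (fun l => l ++ [value])     -- superList[keySup].append(value)
          else
            sl.insert kv.1 [value]                        -- superList[keySup] = [value]
        else sl) superList)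
    (PySem.Dict.empty : PySem.Dict String (List String))).items

-- ===== PORT B =====
def mountDictSupCR_py_alt (CRErrados : List String) (dictSup : List (String × List String)) : List (String × List String) :=
  let index : PySem.Dict String (List String) :=
    dictSup.foldl (fun idx kv =>
      -- 'for v in dict.fromkeys(valueSup)' = distinct values in first-occurrence order
      (PySem.Set.ofList kv.2).foldl (fun idx v =>
        idx.modify v [] (fun l => l ++ [kv.1]))           -- index.setdefault(v, []).append(keySup), exact
        idx) PySem.Dict.empty
  (CRErrados.foldl (fun sl value =>
      (index.getD value []).foldl (fun sl k =>            -- for keySup in index.get(value, [])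
        sl.modify k [] (fun l => l ++ [value]))           -- superList.setdefault(keySup, []).append(value), exact
        sl)
    (PySem.Dict.empty : PySem.Dict String (List String))).items

-- ===== PRECONDITION & SPEC =====
def Spec_mountDictSupCR_py (CRErrados : List String) (dictSup : List (String × List String)) (out : List (String × List String)) : Prop := out = mountDictSupCR_py_alt CRErrados dictSup
instance (CRErrados : List String) (dictSup : List (String × List String)) (out : List (String × List String)) : Decidable (Spec_mountDictSupCR_py CRErrados dictSup out) := by unfold Spec_mountDictSupCR_py; infer_instance

-- ===== CLAIM (what is proved, stated in full; the proofs are below) =====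
def Claim_equal_mountDictSupCR_py : Prop := ∀ (CRErrados : List String) (dictSup : List (String × List String)), Dom_mountDictSupCR_py CRErrados dictSup → Spec_mountDictSupCR_py CRErrados dictSup (mountDictSupCR_py CRErrados dictSup)

-- ===== LEMMAS AND PROOFS =====

-- A's 'if key present then append else start [v]' is exactly Dict.modify with default [].
theorem modify_append_of_cases (sl : PySem.Dict String (List String)) (k v : String) :
    (if sl.contains k then sl.modify k [] (fun l => l ++ [v]) else sl.insert k [v])
      = sl.modify k [] (fun l => l ++ [v]) := by
  by_cases h : sl.contains k
  · simp [h]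
  · have hc : sl.contains k = false := by simpa using h
    simp [hc, PySem.Dict.modify, PySem.Dict.getD_of_not_contains sl [] hc]

-- Appending k to idx[v] for each v in a Nodup list l changes idx[value] by [k] iff value ∈ l.
theorem getD_foldl_modify_nodup (l : List String) (hl : l.Nodup) (k value : String)
    (idx : PySem.Dict String (List String)) :
    ((l.foldl (fun idx v => idx.modify v [] (fun t => t ++ [k])) idx).getD value [])
      = idx.getD value [] ++ (if value ∈ l then [k] else []) := by
  induction l generalizing idx with
  | nil => simp
  | cons x xs ih =>
    simp only [List.foldl_cons]
    rw [ih (by exact hl.of_cons)]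
    rw [PySem.Dict.getD_modify]
    by_cases hvx : value = x
    · subst hvx
      have : value ∉ xs := (List.nodup_cons.mp hl).1
      simp [this]
    · simp [hvx]

-- Characterisation of B's index: index[value] = keys of the dictSup entries whose list contains value.
theorem getD_index (dictSup : List (String × List String)) (value : String)
    (idx0 : PySem.Dict String (List String)) :
    ((dictSup.foldl (fun idx kv =>
        (PySem.Set.ofList kv.2).foldl (fun idx v => idx.modify v [] (fun l => l ++ [kv.1])) idx) idx0).getD value [])
      = idx0.getD value [] ++ (dictSup.filter (fun kv => kv.2.contains value)).map (·.1) := by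
  induction dictSup generalizing idx0 with
  | nil => simp
  | cons kv rest ih =>
    simp only [List.foldl_cons, List.filter_cons]
    rw [ih]
    rw [getD_foldl_modify_nodup _ (PySem.Set.nodup_ofList kv.2)]
    by_cases h : value ∈ kv.2
    · have hc : kv.2.contains value = true := by simpa using h
      simp [PySem.Set.mem_ofList, h, List.append_assoc]
    · have hc : kv.2.contains value = false := by simpa using h
      simp [PySem.Set.mem_ofList, h]

-- For one value, A's scan over dictSup equals B's fold over the index entry.
theorem inner_eq (dictSup : List (String × List String)) (value : String)
    (sl : PySem.Dict String (List String)) :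
    dictSup.foldl (fun sl kv =>
        if kv.2.contains value then
          if sl.contains kv.1 then sl.modify kv.1 [] (fun l => l ++ [value])
          else sl.insert kv.1 [value]
        else sl) sl
      = (((dictSup.foldl (fun idx kv =>
            (PySem.Set.ofList kv.2).foldl (fun idx v => idx.modify v [] (fun l => l ++ [kv.1])) idx)
            PySem.Dict.empty).getD value [])).foldl
          (fun sl k => sl.modify k [] (fun l => l ++ [value])) sl := by
  rw [getD_index, PySem.Dict.getD_empty, List.nil_append]
  refine Eq.trans (PySem.List.foldl_congr_mem dictSup _
    (fun sl kv => if kv.2.contains value then sl.modify kv.1 [] (fun l => l ++ [value]) else sl) sl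
    (fun acc kv _ => by
      by_cases h : kv.2.contains value <;>
        simp only [h, if_true, modify_append_of_cases])) ?_
  rw [PySem.List.foldl_if_eq_foldl_filter]
  rw [List.foldl_map]

-- ===== VERDICT (by name: the statement is the Claim_ definition above) =====
theorem mountDictSupCR_py_spec : Claim_equal_mountDictSupCR_py := by
  intro CRErrados dictSup _
  unfold Spec_mountDictSupCR_py mountDictSupCR_py mountDictSupCR_py_alt
  congr 1
  exact PySem.List.foldl_congr_mem CRErrados _ _ _ (fun sl value _ => inner_eq dictSup value sl)
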